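-- pv_equiv track=rewrite | github.com/nirupamgangurde/Python | Zero_Sum.py | find_zero_sum_sublists
-- ===== SOURCE A (Python) =====
-- def find_zero_sum_sublists(nums):
--     result = []
--     for i in range(len(nums)):
--         sum_so_far = 0
--         for j in range(i, len(nums)):
--             sum_so_far += nums[j]
--             if sum_so_far == 0:
--                 result.append(nums[i:j+1])
--     return result
-- ===== SOURCE B (Python) =====
-- def find_zero_sum_sublists(nums):
--     # Prefix sums grouped by value: nums[i:j] sums to zero iff prefix[i] == prefix[j].
--     prefix = [0]
--     s = 0
--     for x in nums:
--         s += x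
--         prefix.append(s)
--     pos = {}
--     for idx, p in enumerate(prefix):
--         pos.setdefault(p, []).append(idx)
--     result = []
--     for i, p in enumerate(prefix[:-1]):
--         for j in pos[p]:
--             if j > i:
--                 result.append(nums[i:j])
--     return result
-- ===== Notes on version B (the rewrite author's own statement) =====
-- stated objective: faster
-- what changed: Replaces the O(n^2) nested running-sum scan with one prefix-sum pass whose values are grouped by a hashmap, so zero-sum slices are emitted directly from matching prefix-value index pairs in O(n + output) time.
import Mathlib
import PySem

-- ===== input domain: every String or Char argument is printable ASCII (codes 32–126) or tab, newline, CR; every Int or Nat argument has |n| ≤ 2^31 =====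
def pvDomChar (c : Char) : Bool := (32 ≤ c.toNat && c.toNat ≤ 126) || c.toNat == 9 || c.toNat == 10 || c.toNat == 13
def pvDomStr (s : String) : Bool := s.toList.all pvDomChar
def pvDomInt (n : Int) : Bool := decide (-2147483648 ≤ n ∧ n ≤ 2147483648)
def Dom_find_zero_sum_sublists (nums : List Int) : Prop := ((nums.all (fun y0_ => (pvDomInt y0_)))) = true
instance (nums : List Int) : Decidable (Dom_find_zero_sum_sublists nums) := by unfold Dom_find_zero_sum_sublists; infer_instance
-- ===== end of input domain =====

-- B replaces A's nested running-sum scan by one prefix-sum pass grouped in a hashmap (objective: faster).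


-- ===== PORT A =====
-- literal port of A: outer loop over i, inner loop over j keeping a running sum, appending nums[i:j+1] on 0
-- (pyGetD's default is never used: j ranges over [i, len nums), always in range)
def find_zero_sum_sublists (nums : List Int) : List (List Int) :=
  (PySem.List.pyRange 0 nums.length 1).foldl
    (fun result i =>
      ((PySem.List.pyRange i nums.length 1).foldl
        (fun (st : List (List Int) × Int) j =>
          let s := st.2 + PySem.List.pyGetD nums j 0
          (if s = 0 then st.1 ++ [PySem.List.slice nums (some i) (some (j + 1))] else st.1, s))
        (result, 0)).1)
    []

-- ===== PORT B =====
-- literal port of Source B; pos.setdefault(p, []).append(idx) is Dict.modify p [] (· ++ [idx]) (exact)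
def find_zero_sum_sublists_alt (nums : List Int) : List (List Int) :=
  let pr := (nums.foldl (fun (st : List Int × Int) x => (st.1 ++ [st.2 + x], st.2 + x)) ([0], 0)).1
  let pos := (PySem.List.enumerate pr).foldl
    (fun (d : PySem.Dict Int (List Int)) ip => d.modify ip.2 [] (· ++ [ip.1])) PySem.Dict.empty
  (PySem.List.enumerate (PySem.List.slice pr none (some (-1)))).foldl
    (fun result ip =>
      (pos.getD ip.2 []).foldl
        (fun res j => if ip.1 < j then res ++ [PySem.List.slice nums (some ip.1) (some j)] else res)
        result)
    []

-- ===== PRECONDITION & SPEC =====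
def Spec_find_zero_sum_sublists (nums : List Int) (out : List (List Int)) : Prop := out = find_zero_sum_sublists_alt nums
instance (nums : List Int) (out : List (List Int)) : Decidable (Spec_find_zero_sum_sublists nums out) := by unfold Spec_find_zero_sum_sublists; infer_instance

-- ===== CLAIM (what is proved, stated in full; the proofs are below) =====
def Claim_equal_find_zero_sum_sublists : Prop := ∀ (nums : List Int), Dom_find_zero_sum_sublists nums → Spec_find_zero_sum_sublists nums (find_zero_sum_sublists nums)

-- ===== LEMMAS AND PROOFS =====

-- the k-th prefix sum of nums
def pvPref (nums : List Int) (k : Nat) : Int := (nums.take k).sum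

-- the common value: for each start i, the slices nums[i:k] over ends k > i with equal prefix sums
def pvCanon (nums : List Int) : List (List Int) :=
  (List.range nums.length).flatMap (fun i =>
    ((List.range' (i + 1) (nums.length - i)).filter
        (fun k => decide (pvPref nums k = pvPref nums i))).map
      (fun (k : Nat) => PySem.List.slice nums (some (i : Int)) (some (k : Int))))

theorem pvPref_succ (nums : List Int) (j : Nat) (h : j < nums.length) :
    pvPref nums (j + 1) = pvPref nums j + nums[j] := by
  unfold pvPref
  rw [List.take_add_one, List.sum_append, List.getElem?_eq_getElem h]
  simp

-- A's inner loop from j0 with running sum pvPref j0 - pvPref i collects the ends k > j0 with pvPref k = pvPref i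
theorem ainner (nums : List Int) (i j0 : Nat) (res : List (List Int)) :
    ((PySem.List.pyRange (j0 : Int) (nums.length : Int) 1).foldl
      (fun (st : List (List Int) × Int) j =>
        let s := st.2 + PySem.List.pyGetD nums j 0
        (if s = 0 then st.1 ++ [PySem.List.slice nums (some (i : Int)) (some (j + 1))] else st.1, s))
      (res, pvPref nums j0 - pvPref nums i)).1
    = res ++ ((List.range' (j0 + 1) (nums.length - j0)).filter
          (fun k => decide (pvPref nums k = pvPref nums i))).map
        (fun (k : Nat) => PySem.List.slice nums (some (i : Int)) (some (k : Int))) := by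
  by_cases h : j0 < nums.length
  · have hrec := ainner nums i (j0 + 1)
    rw [PySem.List.pyRange_one_cons (by exact_mod_cast h)]
    simp only [List.foldl_cons]
    have hn : nums.length - j0 = (nums.length - (j0 + 1)) + 1 := by omega
    rw [hn, List.range'_succ]
    have hget : PySem.List.pyGetD nums (j0 : Int) 0 = nums[j0] := by
      rw [PySem.List.pyGetD_natCast]; exact List.getD_eq_getElem _ _ h
    have hsum : pvPref nums j0 - pvPref nums i + PySem.List.pyGetD nums (j0 : Int) 0
        = pvPref nums (j0 + 1) - pvPref nums i := by
      rw [hget, pvPref_succ nums j0 h]; ring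
    have hcast : ((j0 : Int) + 1) = ((j0 + 1 : Nat) : Int) := by push_cast; ring
    simp only [hsum, hcast]
    by_cases hz : pvPref nums (j0 + 1) - pvPref nums i = 0
    · have heq : pvPref nums (j0 + 1) = pvPref nums i := by omega
      rw [if_pos hz, hrec]
      simp [heq, List.append_assoc]
    · have hne : ¬ (pvPref nums (j0 + 1) = pvPref nums i) := by omega
      rw [if_neg hz, hrec]
      simp [hne]
  · rw [PySem.List.pyRange_one_eq_nil (by exact_mod_cast Nat.le_of_not_lt h)]
    have : nums.length - j0 = 0 := by omega
    simp [this]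
termination_by nums.length - j0

theorem a_eq_canon (nums : List Int) : find_zero_sum_sublists nums = pvCanon nums := by
  unfold find_zero_sum_sublists pvCanon
  rw [PySem.List.pyRange_zero_nat, List.foldl_map]
  have hbody : ∀ (res : List (List Int)) (i : Nat),
      ((PySem.List.pyRange (i : Int) (nums.length : Int) 1).foldl
        (fun (st : List (List Int) × Int) j =>
          let s := st.2 + PySem.List.pyGetD nums j 0
          (if s = 0 then st.1 ++ [PySem.List.slice nums (some (i : Int)) (some (j + 1))] else st.1, s))
        (res, 0)).1
      = res ++ ((List.range' (i + 1) (nums.length - i)).filter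
            (fun k => decide (pvPref nums k = pvPref nums i))).map
          (fun (k : Nat) => PySem.List.slice nums (some (i : Int)) (some (k : Int))) := by
    intro res i
    have h := ainner nums i i res
    rw [sub_self] at h
    exact h
  rw [funext fun res => funext fun i => hbody res i]
  rw [PySem.List.foldl_append_eq_flatMap]
  simp

-- B-side: the prefix-building loop appends the running sums
theorem bprefix (l : List Int) (pr0 : List Int) (s0 : Int) :
    (l.foldl (fun (st : List Int × Int) x => (st.1 ++ [st.2 + x], st.2 + x)) (pr0, s0)).1
    = pr0 ++ (List.range l.length).map (fun k => s0 + (l.take (k + 1)).sum) := by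
  induction l generalizing pr0 s0 with
  | nil => simp
  | cons x t ih =>
    simp only [List.foldl_cons, ih]
    rw [List.length_cons, List.range_succ_eq_map, List.map_cons, List.map_map]
    simp [List.append_assoc, Function.comp, add_assoc]

theorem hpr (nums : List Int) :
    (nums.foldl (fun (st : List Int × Int) x => (st.1 ++ [st.2 + x], st.2 + x)) (([0] : List Int), (0 : Int))).1
    = (List.range (nums.length + 1)).map (pvPref nums) := by
  rw [bprefix, List.range_succ_eq_map, List.map_cons, List.map_map]
  simp [pvPref]

theorem enum_map_range {α : Type} (m : Nat) (f : Nat → α) :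
    PySem.List.enumerate ((List.range m).map f) 0 = (List.range m).map (fun (k : Nat) => ((k : Int), f k)) := by
  apply List.ext_getElem?
  intro k
  rw [PySem.List.getElem?_enumerate]
  by_cases h : k < m
  · simp [List.getElem?_map, List.getElem?_range h]
  · have hm : m ≤ k := Nat.le_of_not_lt h
    rw [List.getElem?_eq_none (by simp only [List.length_map, List.length_range]; exact hm)]
    simp
    omega

-- the grouping dict maps a value c to the ascending indices of the prefix list holding c
theorem hpos (nums : List Int) (c : Int) :
    ((PySem.List.enumerate ((List.range (nums.length + 1)).map (pvPref nums))).foldl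
      (fun (d : PySem.Dict Int (List Int)) ip => d.modify ip.2 [] (· ++ [ip.1])) PySem.Dict.empty).getD c []
    = ((List.range (nums.length + 1)).filter (fun k => pvPref nums k == c)).map (fun (k : Nat) => (k : Int)) := by
  rw [enum_map_range]
  rw [show ((List.range (nums.length + 1)).map (fun (k : Nat) => ((k : Int), pvPref nums k)))
        = ((List.range (nums.length + 1)).map (fun (k : Nat) => (pvPref nums k, (k : Int)))).map Prod.swap by
      rw [List.map_map]; rfl]
  rw [List.foldl_map]
  simp only [Prod.swap]
  rw [PySem.Dict.getD_foldl_modify_append]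
  rw [List.filter_map, List.map_map]
  simp only [PySem.Dict.getD_empty, List.nil_append, Function.comp_def]

theorem beq_decide (a b : Int) : (a == b) = decide (a = b) := by
  by_cases h : a = b <;> simp [h]

theorem range_split (i n : Nat) (h : i < n) (q : Nat → Bool) :
    (List.range (n + 1)).filter (fun k => decide (i < k) && q k)
    = (List.range' (i + 1) (n - i)).filter q := by
  rw [List.range_eq_range', show n + 1 = (i + 1) + (n - i) by omega, ← List.range'_append]
  rw [List.filter_append]
  have h1 : (List.range' 0 (i + 1)).filter (fun k => decide (i < k) && q k) = [] := by
    apply List.filter_eq_nil_iff.mpr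
    intro k hk
    have : k < i + 1 := by
      have := List.mem_range'.mp hk; omega
    simp [Nat.not_lt.mpr (by omega : k ≤ i)]
  rw [h1, List.nil_append]
  rw [show 0 + 1 * (i + 1) = i + 1 by omega]
  apply List.filter_congr
  intro k hk
  have : i + 1 ≤ k := by have := List.mem_range'.mp hk; omega
  simp [(by omega : i < k)]

theorem b_eq_canon (nums : List Int) : find_zero_sum_sublists_alt nums = pvCanon nums := by
  simp only [find_zero_sum_sublists_alt]
  rw [hpr, PySem.List.slice_to_neg_one]
  rw [show ((List.range (nums.length + 1)).map (pvPref nums)).dropLast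
        = (List.range nums.length).map (pvPref nums) by
      simp [List.range_succ]]
  rw [enum_map_range nums.length (pvPref nums),
      List.foldl_map (f := fun (k : Nat) => ((k : Int), pvPref nums k))]
  have hbody : ∀ (i : Nat), i ∈ List.range nums.length → ∀ (result : List (List Int)),
      (((PySem.List.enumerate ((List.range (nums.length + 1)).map (pvPref nums))).foldl
          (fun (d : PySem.Dict Int (List Int)) ip => d.modify ip.2 [] (· ++ [ip.1]))
          PySem.Dict.empty).getD (pvPref nums i) []).foldl
        (fun res j => if (i : Int) < j then res ++ [PySem.List.slice nums (some (i : Int)) (some j)] else res)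
        result
      = result ++ ((List.range' (i + 1) (nums.length - i)).filter
            (fun k => decide (pvPref nums k = pvPref nums i))).map
          (fun (k : Nat) => PySem.List.slice nums (some (i : Int)) (some (k : Int))) := by
    intro i hi result
    have hin : i < nums.length := List.mem_range.mp hi
    rw [hpos nums (pvPref nums i)]
    rw [PySem.List.foldl_append_ite]
    rw [List.filter_map, List.map_map]
    have hq : ((fun (j : Int) => decide ((i : Int) < j)) ∘ (fun (k : Nat) => (k : Int)))
        = fun (k : Nat) => decide (i < k) := by
      funext k; simp [Function.comp]
    rw [hq, List.filter_filter]
    simp only [beq_decide]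
    rw [range_split i nums.length hin]
    simp [Function.comp]
  rw [PySem.List.foldl_congr_mem' _ _ _ _ hbody]
  rw [PySem.List.foldl_append_eq_flatMap]
  simp [pvCanon]

-- ===== VERDICT (by name: the statement is the Claim_ definition above) =====
theorem find_zero_sum_sublists_spec : Claim_equal_find_zero_sum_sublists := by
  intro nums _
  unfold Spec_find_zero_sum_sublists
  rw [a_eq_canon, b_eq_canon]
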